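-- pv_equiv track=rewrite | github.com/Stealth-py/The12Rings-Cipher-Bot | Ciphers/tw_cipher.py | eclock_cipher
-- ===== SOURCE A (Python) =====
-- d = {
--     0: ['a', 'm', 'y'],
--     1: ['b', 'n', 'z'],
--     2: ['c', 'o'],
--     3: ['d', 'p'],
--     4: ['e', 'q'],
--     5: ['f', 'r'],
--     6: ['g', 's'],
--     7: ['h', 't'],
--     8: ['i', 'u'],
--     9: ['j', 'v'],
--     10: ['k', 'w'],
--     11: ['l', 'x']
-- }
--
-- def eclock_cipher(inp):
--     inp = inp.split('.')
--     inp = ''.join(inp)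
--     res=[]
--     for i in inp:
--         for j in d:
--             if i in d[j]:
--                 res.append(j)
--     return res
-- ===== SOURCE B (Python) =====
-- def eclock_cipher(inp):
--     return [(ord(c) - 97) % 12 for c in inp if 'a' <= c <= 'z']
-- ===== Notes on version B (the rewrite author's own statement) =====
-- stated objective: simpler
-- what changed: Replaces the split/join preprocessing and the nested scan over the 12-entry clock dictionary with a single comprehension computing each clock number by the closed form (ord(c)-97)%12 for lowercase letters, skipping every other character.
import Mathlib
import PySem

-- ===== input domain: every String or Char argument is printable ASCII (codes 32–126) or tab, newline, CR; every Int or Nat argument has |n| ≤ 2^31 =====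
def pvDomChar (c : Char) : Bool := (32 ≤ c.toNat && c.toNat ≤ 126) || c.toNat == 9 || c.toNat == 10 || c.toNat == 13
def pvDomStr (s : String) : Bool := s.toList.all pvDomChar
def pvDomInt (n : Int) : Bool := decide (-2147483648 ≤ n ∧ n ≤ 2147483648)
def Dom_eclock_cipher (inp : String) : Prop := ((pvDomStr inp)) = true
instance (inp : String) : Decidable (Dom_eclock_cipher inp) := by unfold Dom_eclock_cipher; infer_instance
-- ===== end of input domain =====

-- B replaces the nested scan over the 12-entry clock dictionary by the closed form
-- (ord(c)-97)%12 on lowercase letters; objective: simpler.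

-- ===== PORT A =====
-- the module-level dict d, in insertion order
def pvClockDict : PySem.Dict Int (List Char) :=
  PySem.Dict.ofList
  [(0, ['a','m','y']), (1, ['b','n','z']), (2, ['c','o']), (3, ['d','p']),
   (4, ['e','q']), (5, ['f','r']), (6, ['g','s']), (7, ['h','t']),
   (8, ['i','u']), (9, ['j','v']), (10, ['k','w']), (11, ['l','x'])]

def eclock_cipher (inp : String) : List Int :=
  -- inp = ''.join(inp.split('.'));  for i in inp: for j in d: if i in d[j]: res.append(j)
  (PySem.Chars.join [] (PySem.Chars.splitOn inp.toList ['.'])).foldl (fun res i =>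
    (PySem.Dict.keys pvClockDict).foldl (fun res j =>
      if i ∈ PySem.Dict.getD pvClockDict j [] then res ++ [j] else res) res) []

-- ===== PORT B =====
def eclock_cipher_alt (inp : String) : List Int :=
  inp.toList.filterMap (fun c =>
    if 'a' ≤ c ∧ c ≤ 'z' then some (PySem.Int.mod ((c.toNat : Int) - 97) 12) else none)

-- ===== PRECONDITION & SPEC =====
def Spec_eclock_cipher (inp : String) (out : List Int) : Prop := out = eclock_cipher_alt inp
instance (inp : String) (out : List Int) : Decidable (Spec_eclock_cipher inp out) := by unfold Spec_eclock_cipher; infer_instance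

-- ===== CLAIM (what is proved, stated in full; the proofs are below) =====
def Claim_equal_eclock_cipher : Prop := ∀ (inp : String), Dom_eclock_cipher inp → Spec_eclock_cipher inp (eclock_cipher inp)

-- ===== LEMMAS AND PROOFS =====

-- what A's inner dict loop appends for one character
def pvStepA (c : Char) : List Int :=
  ((PySem.Dict.keys pvClockDict).filter
    (fun j => decide (c ∈ PySem.Dict.getD pvClockDict j []))).map id

-- what B emits for one character
def pvStepB (c : Char) : Option Int :=
  if 'a' ≤ c ∧ c ≤ 'z' then some (PySem.Int.mod ((c.toNat : Int) - 97) 12) else none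

theorem pv_inner (c : Char) (res : List Int) :
    (PySem.Dict.keys pvClockDict).foldl (fun res j =>
      if c ∈ PySem.Dict.getD pvClockDict j [] then res ++ [j] else res) res
      = res ++ pvStepA c := by
  simpa [pvStepA] using
    PySem.List.foldl_append_if
      (fun j => decide (c ∈ PySem.Dict.getD pvClockDict j [])) id
      (PySem.Dict.keys pvClockDict) res

theorem pv_join_flatten : ∀ (ps : List (List Char)),
    PySem.Chars.join [] ps = ps.flatten := by
  intro ps
  induction ps with
  | nil => rfl
  | cons x xs ih =>
    have h : PySem.Chars.join [] (x :: xs) = x ++ PySem.Chars.join [] xs := by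
      cases xs <;> simp [PySem.Chars.join, List.intercalate]
    simp [h, ih]

theorem pv_go_flatten : ∀ (fuel : Nat) (l cur : List Char) (accs : List (List Char)),
    l.length < fuel →
    (PySem.Chars.splitOn.go ['.'] fuel l cur accs).flatten
      = accs.reverse.flatten ++ cur.reverse ++ l.filter (· ≠ '.') := by
  intro fuel
  induction fuel with
  | zero => intro l cur accs h; omega
  | succ n ih =>
    intro l cur accs h
    cases l with
    | nil => simp [PySem.Chars.splitOn.go]
    | cons c rest =>
      rw [List.length_cons] at h
      rw [PySem.Chars.splitOn.go]
      by_cases hc : c = '.'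
      · subst hc
        simp only [List.isPrefixOf, BEq.rfl, Bool.true_and, if_true, List.length_singleton,
          List.drop_succ_cons, List.drop_zero]
        rw [ih rest [] _ (by omega)]
        simp [List.filter]
      · have hp : (['.'].isPrefixOf (c :: rest)) = false := by
          simp [List.isPrefixOf]; exact fun h => absurd h.symm hc
        rw [hp]
        simp only [Bool.false_eq_true, if_false]
        rw [ih rest (c :: cur) accs (by omega)]
        simp [List.filter, hc]

theorem pv_removeDots (l : List Char) :
    PySem.Chars.join [] (PySem.Chars.splitOn l ['.']) = l.filter (· ≠ '.') := by
  rw [pv_join_flatten, PySem.Chars.splitOn,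
    pv_go_flatten (l.length + 1) l [] [] (by omega)]
  simp

-- the 26 letter assignments of the dict agree with the closed form, checked over all ASCII
set_option maxHeartbeats 1000000 in
set_option maxRecDepth 10000 in
theorem pv_step_fin : ∀ n : Fin 127,
    pvStepA (Char.ofNat n.val) = (pvStepB (Char.ofNat n.val)).toList := by decide

theorem pv_step_eq (c : Char) (hd : pvDomChar c = true) :
    pvStepA c = (pvStepB c).toList := by
  have hlt : c.toNat < 127 := by
    simp [pvDomChar] at hd; omega
  have := pv_step_fin ⟨c.toNat, hlt⟩
  simpa [Char.ofNat_toNat] using this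

theorem pv_main_list : ∀ (l : List Char), (∀ c ∈ l, pvDomChar c = true) →
    (l.filter (· ≠ '.')).flatMap pvStepA = l.flatMap (fun c => (pvStepB c).toList) := by
  intro l
  induction l with
  | nil => intro _; rfl
  | cons c t ih =>
    intro hd
    have hdc : pvDomChar c = true := hd c (by simp)
    have hdt : ∀ x ∈ t, pvDomChar x = true := fun x hx => hd x (by simp [hx])
    have iht := ih hdt
    simp only [ne_eq, decide_not] at iht
    by_cases hc : c = '.'
    · subst hc
      have hnone : pvStepB '.' = none := by decide
      simp [List.filter, hnone, iht]
    · simp [List.filter, hc, iht, pv_step_eq c hdc]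

-- ===== VERDICT (by name: the statement is the Claim_ definition above) =====
theorem eclock_cipher_spec : Claim_equal_eclock_cipher := by
  intro inp hdom
  unfold Spec_eclock_cipher eclock_cipher eclock_cipher_alt
  have houter :
      (fun (res : List Int) (i : Char) =>
        (PySem.Dict.keys pvClockDict).foldl (fun res j =>
          if i ∈ PySem.Dict.getD pvClockDict j [] then res ++ [j] else res) res)
      = fun res i => res ++ pvStepA i := by
    funext res i; exact pv_inner i res
  rw [pv_removeDots, houter, PySem.List.foldl_append_eq_flatMap]
  have hd : ∀ c ∈ inp.toList, pvDomChar c = true := by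
    simpa [Dom_eclock_cipher, pvDomStr, List.all_eq_true] using hdom
  rw [List.nil_append, pv_main_list inp.toList hd]
  simp only [pvStepB]
  exact Eq.symm (List.filterMap_eq_flatMap_toList _ inp.toList)
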